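-- pv_equiv track=rewrite | github.com/MatthieuSarter/AdventOfCode | AoC_2019/Day16/__init__.py | get_fft_pattern
-- ===== SOURCE A (Python) =====
-- def get_fft_pattern(position, length):
--     # type: (int, int) -> List[int]
--     '''
--     Get the pattern for calculating the nth digit of the output.
--     '''
--     base_pattern = [0, 1, 0, -1]
--     pattern = []
--     for i in range(0, position * len(base_pattern)):
--         pattern.append(base_pattern[i // position])
--
--     repeats = length // len(pattern) + 1
--     pattern = pattern * repeats
--
--     return pattern[1:length + 1]
-- ===== SOURCE B (Python) =====
-- def get_fft_pattern(position, length):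
--     # type: (int, int) -> List[int]
--     '''
--     Get the pattern for calculating the nth digit of the output.
--     '''
--     base_pattern = [0, 1, 0, -1]
--     return [base_pattern[(i // position) % 4] for i in range(1, length + 1)]
-- ===== Notes on version B (the rewrite author's own statement) =====
-- stated objective: simpler
-- what changed: B computes each output digit directly as base_pattern[(i // position) % 4] in one comprehension over output indices, eliminating A's period-block build loop, list multiplication and slice (measured constant-factor speedup).
import Mathlib
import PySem

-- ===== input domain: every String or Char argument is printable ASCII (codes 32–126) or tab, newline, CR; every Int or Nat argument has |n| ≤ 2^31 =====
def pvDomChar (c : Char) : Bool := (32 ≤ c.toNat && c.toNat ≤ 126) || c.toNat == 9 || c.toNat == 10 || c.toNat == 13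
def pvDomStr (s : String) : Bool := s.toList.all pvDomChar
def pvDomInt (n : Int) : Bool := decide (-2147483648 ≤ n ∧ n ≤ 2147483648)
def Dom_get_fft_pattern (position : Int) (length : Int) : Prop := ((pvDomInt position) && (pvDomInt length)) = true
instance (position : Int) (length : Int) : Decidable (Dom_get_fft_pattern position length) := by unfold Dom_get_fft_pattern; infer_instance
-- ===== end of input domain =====

-- B replaces A's build-pattern/multiply/slice pipeline by a direct per-index formula; equal on position >= 1 (elsewhere A raises ZeroDivisionError).


-- ===== PORT A =====
def get_fft_pattern (position : Int) (length : Int) : List Int :=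
  let base_pattern : List Int := [0, 1, 0, -1]
  -- list.append ported with an O(1) Array.push accumulator (same loop, same elements, in order)
  let pattern : Array Int := (PySem.List.pyRange 0 (position * 4) 1).foldl
      (fun acc i => acc.push (PySem.List.pyGetD base_pattern (PySem.Int.floordiv i position) 0)) #[]
  let repeats : Int := PySem.Int.floordiv length (pattern.size : Int) + 1
  let pattern2 : List Int := (List.replicate repeats.toNat pattern.toList).flatten
  PySem.List.slice pattern2 (some 1) (some (length + 1))

-- ===== PORT B =====
def get_fft_pattern_alt (position : Int) (length : Int) : List Int :=
  let base_pattern : List Int := [0, 1, 0, -1]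
  (PySem.List.pyRange 1 (length + 1) 1).map
    (fun i => PySem.List.pyGetD base_pattern (PySem.Int.mod (PySem.Int.floordiv i position) 4) 0)

-- ===== PRECONDITION & SPEC =====
-- Pre_ excludes position <= 0: there A's pattern list is empty and 'length // len(pattern)' raises ZeroDivisionError.
def Pre_get_fft_pattern (position : Int) (length : Int) : Prop := 1 ≤ position
instance (position : Int) (length : Int) : Decidable (Pre_get_fft_pattern position length) := by unfold Pre_get_fft_pattern; infer_instance
def pvWitness_get_fft_pattern : Int × Int := (2, 10)

def Spec_get_fft_pattern (position : Int) (length : Int) (out : List Int) : Prop := out = get_fft_pattern_alt position length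
instance (position : Int) (length : Int) (out : List Int) : Decidable (Spec_get_fft_pattern position length out) := by unfold Spec_get_fft_pattern; infer_instance

-- ===== CLAIM (what is proved, stated in full; the proofs are below) =====
def Claim_equal_get_fft_pattern : Prop := ∀ (position : Int) (length : Int), Dom_get_fft_pattern position length → Pre_get_fft_pattern position length → Spec_get_fft_pattern position length (get_fft_pattern position length)

-- ===== LEMMAS AND PROOFS =====

-- the push-accumulator loop, read back as a list, is the map of the loop body
theorem foldl_push_toList {A B : Type} (f : A -> B) (l : List A) (arr : Array B) :
    (l.foldl (fun acc x => acc.push (f x)) arr).toList = arr.toList ++ l.map f := by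
  induction l generalizing arr with
  | nil => simp
  | cons x xs ih => simp [ih]

theorem toNat_natCast_add_one (a : Nat) : (((a : Nat) : Int) + 1).toNat = a + 1 := by omega

-- getElem? of n concatenated copies of xs: index j < n * |xs| reads xs at j % |xs|.
theorem flatten_replicate_getElem? {α : Type} (r : Nat) (xs : List α) (j : Nat)
    (hj : j < r * xs.length) :
    (List.flatten (List.replicate r xs))[j]? = xs[j % xs.length]? := by
  induction r generalizing j with
  | zero => omega
  | succ r ih =>
    rw [Nat.succ_mul] at hj
    simp only [List.replicate_succ, List.flatten_cons]
    by_cases h : j < xs.length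
    · rw [List.getElem?_append_left h, Nat.mod_eq_of_lt h]
    · rw [List.getElem?_append_right (by omega)]
      rw [ih (j - xs.length) (by omega)]
      conv_rhs => rw [show j = (j - xs.length) + xs.length by omega]
      rw [Nat.add_mod_right]

theorem get_fft_pattern_eq (position length : Int) (hp : 1 ≤ position) :
    get_fft_pattern position length = get_fft_pattern_alt position length := by
  unfold get_fft_pattern get_fft_pattern_alt
  dsimp only
  rw [← Array.length_toList, foldl_push_toList]
  set base : List Int := [0, 1, 0, -1] with hbase
  set g : Int → Int := fun i => PySem.List.pyGetD base (PySem.Int.floordiv i position) 0 with hg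
  set P : List Int := (PySem.List.pyRange 0 (position * 4) 1).map g with hP
  simp only [List.nil_append]
  have hPlen : P.length = (position * 4).toNat := by
    simp [hP, PySem.List.length_pyRange_one]
  have hL4 : (4 : Int) ≤ position * 4 := by omega
  have hLpos : 0 < P.length := by omega
  have hLposI : (0 : Int) < (P.length : Int) := by exact_mod_cast hLpos
  by_cases hl : length < 0
  · -- both sides are empty: repeats <= 0 on the left, an empty range on the right
    have hB : PySem.List.pyRange 1 (length + 1) 1 = [] := by
      rw [PySem.List.pyRange_one]
      have h0 : (length + 1 - 1).toNat = 0 := by omega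
      rw [h0]
      rfl
    have hfd : PySem.Int.floordiv length (P.length : Int) < 0 :=
      (PySem.Int.floordiv_lt_iff_lt_mul hLposI).mpr (by omega)
    have hrep : (PySem.Int.floordiv length (P.length : Int) + 1).toNat = 0 := by omega
    rw [hrep, hB]
    simp [PySem.List.slice]
  · -- length >= 0
    set n : Nat := length.toNat with hn
    have hlen : length = (n : Int) := by omega
    set p' : Nat := position.toNat with hp'
    have hpos : position = (p' : Int) := by omega
    have hLval : P.length = p' * 4 := by omega
    -- repeats as a natural number
    have hfd2 : PySem.Int.floordiv length ((P.length : Nat) : Int) = ((n / (p' * 4) : Nat) : Int) := by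
      rw [hlen, hLval]; exact PySem.Int.floordiv_natCast n (p' * 4)
    have hrep : (PySem.Int.floordiv length (P.length : Int) + 1).toNat = n / (p' * 4) + 1 := by
      rw [hfd2]; exact toNat_natCast_add_one _
    rw [hrep]
    -- the left slice has both bounds nonnegative
    rw [PySem.List.slice_toNat ((List.replicate (n / (p' * 4) + 1) P).flatten) (a := 1) (b := length + 1) (by omega) (by omega)]
    simp only [Int.toNat_one]
    have hb : (length + 1).toNat - 1 = n := by omega
    rw [hb]
    rw [PySem.List.pyRange_one]
    have hn' : (length + 1 - 1).toNat = n := by omega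
    rw [hn']
    apply List.ext_getElem?
    intro k
    rw [List.getElem?_take, List.getElem?_map, List.getElem?_map]
    by_cases hk : k < n
    · rw [if_pos hk, List.getElem?_range hk, List.getElem?_drop]
      have hflat : (1 + k) < (n / (p' * 4) + 1) * P.length := by
        have h1 : n < (p' * 4) * (n / (p' * 4) + 1) := Nat.lt_mul_div_succ n (by omega)
        calc 1 + k ≤ n := by omega
          _ < (p' * 4) * (n / (p' * 4) + 1) := h1
          _ = (n / (p' * 4) + 1) * P.length := by rw [hLval]; ring
      rw [flatten_replicate_getElem? _ _ _ hflat]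
      have hm : (1 + k) % P.length < P.length := Nat.mod_lt _ hLpos
      have hPget : P[(1 + k) % P.length]? = some (g (((1 + k) % P.length : Nat) : Int)) := by
        rw [hP, List.getElem?_map, PySem.List.getElem?_pyRange_one]
        have hmlt : (1 + k) % P.length < (position * 4 - 0).toNat := by omega
        rw [if_pos hmlt]
        simp only [Option.map_some, zero_add]
      rw [hPget]
      simp only [Option.map_some]
      congr 1
      -- g ((1+k) % (4p)) = f (1+k)
      rw [hg]
      dsimp only
      congr 1
      -- index arithmetic: ((1+k) % (p'*4)) // p' = ((1+k) // p') % 4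
      rw [hpos, hLval]
      rw [show ((1 : Int) + (k : Int)) = ((1 + k : Nat) : Int) by push_cast; ring]
      rw [PySem.Int.floordiv_natCast, PySem.Int.floordiv_natCast]
      rw [show ((4 : Int)) = ((4 : Nat) : Int) by rfl]
      rw [PySem.Int.mod_natCast]
      rw [← Nat.mod_mul_right_div_self]
    · rw [if_neg hk]
      have hnone : (List.range n)[k]? = none := by
        rw [List.getElem?_eq_none_iff, List.length_range]
        omega
      rw [hnone]
      rfl

-- ===== VERDICT (by name: the statement is the Claim_ definition above) =====
theorem get_fft_pattern_spec : Claim_equal_get_fft_pattern := by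
  intro position length _ hpre
  exact get_fft_pattern_eq position length hpre
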